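-- pv_equiv track=rewrite | github.com/yashaskl2110/lotx-detector | oauth_scope_checker.py | assess_real_scopes
-- ===== SOURCE A (Python) =====
-- SCOPE_DESCRIPTIONS = {
--     'https://www.googleapis.com/auth/calendar.readonly':
--         ('MEDIUM', 'Read all calendar events'),
--     'https://www.googleapis.com/auth/calendar':
--         ('HIGH', 'Full calendar read and write'),
--     'https://www.googleapis.com/auth/gmail.readonly':
--         ('HIGH', 'Read all Gmail messages'),
--     'https://www.googleapis.com/auth/gmail.modify':
--         ('CRITICAL', 'Read modify and delete Gmail'),
--     'https://www.googleapis.com/auth/drive':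
--         ('CRITICAL', 'Full Google Drive access'),
--     'https://www.googleapis.com/auth/drive.readonly':
--         ('HIGH', 'Read all Google Drive files'),
--     'https://www.googleapis.com/auth/admin.directory.user':
--         ('CRITICAL', 'Manage all Google Workspace users'),
--     'https://www.googleapis.com/auth/spreadsheets':
--         ('HIGH', 'Read and write all Google Sheets'),
--     'https://www.googleapis.com/auth/contacts':
--         ('HIGH', 'Read and write all contacts'),
--     'openid':
--         ('LOW', 'Verify identity'),
--     'https://www.googleapis.com/auth/userinfo.email':
--         ('LOW', 'Read email address'),
--     'https://www.googleapis.com/auth/userinfo.profile':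
--         ('LOW', 'Read basic profile info'),
-- }
--
-- def assess_real_scopes(token_data):
--     """
--     Assess risk of your actual granted scopes.
--     Every finding here is from your real Google account.
--     """
--     if not token_data:
--         return []
--
--     scopes = token_data['scopes']
--     findings = []
--     risk_order = {'CRITICAL': 0, 'HIGH': 1, 'MEDIUM': 2, 'LOW': 3}
--     overall_risk = 'LOW'
--
--     for scope in scopes:
--         if scope in SCOPE_DESCRIPTIONS:
--             risk, description = SCOPE_DESCRIPTIONS[scope]
--             findings.append({
--                 'scope': scope,
--                 'risk': risk,
--                 'description': description
--             })
--             if risk_order[risk] < risk_order[overall_risk]: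
--                 overall_risk = risk
--
--     return findings, overall_risk
-- ===== SOURCE B (Python) =====
-- SCOPE_DESCRIPTIONS = {
--     'https://www.googleapis.com/auth/calendar.readonly':
--         ('MEDIUM', 'Read all calendar events'),
--     'https://www.googleapis.com/auth/calendar':
--         ('HIGH', 'Full calendar read and write'),
--     'https://www.googleapis.com/auth/gmail.readonly':
--         ('HIGH', 'Read all Gmail messages'),
--     'https://www.googleapis.com/auth/gmail.modify':
--         ('CRITICAL', 'Read modify and delete Gmail'),
--     'https://www.googleapis.com/auth/drive':
--         ('CRITICAL', 'Full Google Drive access'),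
--     'https://www.googleapis.com/auth/drive.readonly':
--         ('HIGH', 'Read all Google Drive files'),
--     'https://www.googleapis.com/auth/admin.directory.user':
--         ('CRITICAL', 'Manage all Google Workspace users'),
--     'https://www.googleapis.com/auth/spreadsheets':
--         ('HIGH', 'Read and write all Google Sheets'),
--     'https://www.googleapis.com/auth/contacts':
--         ('HIGH', 'Read and write all contacts'),
--     'openid':
--         ('LOW', 'Verify identity'),
--     'https://www.googleapis.com/auth/userinfo.email':
--         ('LOW', 'Read email address'),
--     'https://www.googleapis.com/auth/userinfo.profile':
--         ('LOW', 'Read basic profile info'),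
-- }
--
--
-- def assess_real_scopes(token_data):
--     """No risk comparisons at all: collect the SET of risk levels present among the
--     recognised scopes, then walk the fixed severity ladder top-down and take the
--     first level that is present ('LOW' if none above it is)."""
--     if not token_data:
--         return []
--     scopes = token_data['scopes']
--
--     present = {SCOPE_DESCRIPTIONS[s][0] for s in scopes if s in SCOPE_DESCRIPTIONS}
--     overall_risk = 'LOW'
--     for level in ('CRITICAL', 'HIGH', 'MEDIUM'):
--         if level in present:
--             overall_risk = level
--             break
--
--     findings = [{'scope': s,
--                  'risk': SCOPE_DESCRIPTIONS[s][0],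
--                  'description': SCOPE_DESCRIPTIONS[s][1]}
--                 for s in scopes if s in SCOPE_DESCRIPTIONS]
--     return findings, overall_risk
-- ===== Notes on version B (the rewrite author's own statement) =====
-- stated objective: alternative
-- what changed: A's fused loop with a numeric risk_order and a running minimum is replaced by a reduction with no risk comparisons at all: B first collects the set of risk levels present among the recognised scopes, then scans the fixed severity ladder CRITICAL>HIGH>MEDIUM top-down and takes the first level present (LOW otherwise); findings are produced in a separate pass.
-- outside the precondition, e.g. on assess_real_scopes({}): A returns (), B returns (); on assess_real_scopes({'other': []}): A raises KeyError, B raises KeyError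
import Mathlib
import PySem

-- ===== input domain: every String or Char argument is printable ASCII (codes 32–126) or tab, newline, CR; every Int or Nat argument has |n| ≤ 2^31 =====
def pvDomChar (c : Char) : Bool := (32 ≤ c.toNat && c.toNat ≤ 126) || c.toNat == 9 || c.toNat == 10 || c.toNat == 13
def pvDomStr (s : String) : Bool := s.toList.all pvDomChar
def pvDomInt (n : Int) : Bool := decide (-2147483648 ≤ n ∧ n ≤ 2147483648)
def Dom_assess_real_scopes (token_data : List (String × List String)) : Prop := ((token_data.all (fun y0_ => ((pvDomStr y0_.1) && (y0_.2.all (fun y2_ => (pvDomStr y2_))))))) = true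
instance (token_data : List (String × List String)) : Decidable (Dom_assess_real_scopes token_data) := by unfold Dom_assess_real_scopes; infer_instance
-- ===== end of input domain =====

-- B replaces A's fused loop (findings + numeric running-minimum) by a set of the risk
-- levels present plus a top-down scan of the fixed severity ladder, and a separate
-- findings pass; equal return values on Pre_ (non-empty dict with a 'scopes' key).

-- ===== PORT A =====
-- SCOPE_DESCRIPTIONS (module constant), as an association list; lookup = first match
def pvSD : List (String × (String × String)) :=
  [("https://www.googleapis.com/auth/calendar.readonly", ("MEDIUM", "Read all calendar events")),
   ("https://www.googleapis.com/auth/calendar", ("HIGH", "Full calendar read and write")),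
   ("https://www.googleapis.com/auth/gmail.readonly", ("HIGH", "Read all Gmail messages")),
   ("https://www.googleapis.com/auth/gmail.modify", ("CRITICAL", "Read modify and delete Gmail")),
   ("https://www.googleapis.com/auth/drive", ("CRITICAL", "Full Google Drive access")),
   ("https://www.googleapis.com/auth/drive.readonly", ("HIGH", "Read all Google Drive files")),
   ("https://www.googleapis.com/auth/admin.directory.user", ("CRITICAL", "Manage all Google Workspace users")),
   ("https://www.googleapis.com/auth/spreadsheets", ("HIGH", "Read and write all Google Sheets")),
   ("https://www.googleapis.com/auth/contacts", ("HIGH", "Read and write all contacts")),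
   ("openid", ("LOW", "Verify identity")),
   ("https://www.googleapis.com/auth/userinfo.email", ("LOW", "Read email address")),
   ("https://www.googleapis.com/auth/userinfo.profile", ("LOW", "Read basic profile info"))]

-- risk_order = {'CRITICAL': 0, 'HIGH': 1, 'MEDIUM': 2, 'LOW': 3}; risk_order[r] (keys always hit)
def pvOrd (r : String) : Int :=
  (([("CRITICAL", (0:Int)), ("HIGH", 1), ("MEDIUM", 2), ("LOW", 3)]).lookup r).getD 99

-- A's loop body: append the finding, update the running minimum
def pvStepA (st : (List (List (String × String))) × String) (scope : String) :
    (List (List (String × String))) × String :=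
  match pvSD.lookup scope with
  | some (risk, description) =>
      (st.1 ++ [[("scope", scope), ("risk", risk), ("description", description)]],
       if pvOrd risk < pvOrd st.2 then risk else st.2)
  | none => st

def assess_real_scopes (token_data : List (String × List String)) : (List (List (String × String))) × String :=
  if token_data = [] then ([], "LOW")     -- Python returns bare []; excluded by Pre_
  else
    match token_data.lookup "scopes" with
    | none => ([], "LOW")                 -- Python raises KeyError; excluded by Pre_
    | some scopes => scopes.foldl pvStepA ([], "LOW")

-- ===== PORT B =====
def pvFinding (s r d : String) : List (String × String) :=
  [("scope", s), ("risk", r), ("description", d)]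

-- {SCOPE_DESCRIPTIONS[s][0] for s in scopes if s in SCOPE_DESCRIPTIONS}
def pvPresent (scopes : List String) : PySem.Set String :=
  PySem.Set.ofList (scopes.filterMap (fun s => (pvSD.lookup s).map (fun rd => rd.1)))

-- for level in ('CRITICAL','HIGH','MEDIUM'): if level in present: overall=level; break
def pvLadder (present : PySem.Set String) : String :=
  if PySem.Set.contains present "CRITICAL" then "CRITICAL"
  else if PySem.Set.contains present "HIGH" then "HIGH"
  else if PySem.Set.contains present "MEDIUM" then "MEDIUM"
  else "LOW"

def assess_real_scopes_alt (token_data : List (String × List String)) : (List (List (String × String))) × String :=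
  if token_data = [] then ([], "LOW")     -- Python returns bare []; excluded by Pre_
  else
    match token_data.lookup "scopes" with
    | none => ([], "LOW")                 -- Python raises KeyError; excluded by Pre_
    | some scopes =>
      let overall := pvLadder (pvPresent scopes)
      let findings := scopes.filterMap
        (fun s => (pvSD.lookup s).map (fun rd => pvFinding s rd.1 rd.2))
      (findings, overall)

-- ===== PRECONDITION & SPEC =====
-- Pre_ excludes the falsy/empty dict (A returns a bare list [], not a (findings, risk) tuple
-- of the declared return type) and dicts without a 'scopes' key (A raises KeyError).
def Pre_assess_real_scopes (token_data : List (String × List String)) : Prop :=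
  token_data ≠ [] ∧ "scopes" ∈ token_data.map Prod.fst
instance (token_data : List (String × List String)) : Decidable (Pre_assess_real_scopes token_data) := by
  unfold Pre_assess_real_scopes; infer_instance

def pvWitness_assess_real_scopes : (List (String × List String)) :=
  [("scopes", ["openid", "https://www.googleapis.com/auth/drive"])]

def Spec_assess_real_scopes (token_data : List (String × List String)) (out : (List (List (String × String))) × String) : Prop := out = assess_real_scopes_alt token_data
instance (token_data : List (String × List String)) (out : (List (List (String × String))) × String) : Decidable (Spec_assess_real_scopes token_data out) := by unfold Spec_assess_real_scopes; infer_instance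

-- ===== CLAIM (what is proved, stated in full; the proofs are below) =====
def Claim_equal_assess_real_scopes : Prop := ∀ (token_data : List (String × List String)), Dom_assess_real_scopes token_data → Pre_assess_real_scopes token_data → Spec_assess_real_scopes token_data (assess_real_scopes token_data)

-- ===== LEMMAS AND PROOFS =====

-- the findings B builds
def pvF (scopes : List String) : List (List (String × String)) :=
  scopes.filterMap (fun s => (pvSD.lookup s).map (fun rd => pvFinding s rd.1 rd.2))

-- the corresponding risks
def pvR (scopes : List String) : List String :=
  scopes.filterMap (fun s => (pvSD.lookup s).map (fun rd => rd.1))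

-- A's running minimum as a fold
def pvMF (b : String) (rs : List String) : String :=
  rs.foldl (fun best r => if pvOrd r < pvOrd best then r else best) b

-- one min step
def pvMin2 (b r : String) : String := if pvOrd r < pvOrd b then r else b

-- ladder choice over a plain risk list
def pvPick (rs : List String) : String :=
  if "CRITICAL" ∈ rs then "CRITICAL"
  else if "HIGH" ∈ rs then "HIGH"
  else if "MEDIUM" ∈ rs then "MEDIUM"
  else "LOW"

def pvFour (r : String) : Prop :=
  r = "CRITICAL" ∨ r = "HIGH" ∨ r = "MEDIUM" ∨ r = "LOW"

-- every risk stored in the table is one of the four levels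
theorem pvSD_risk {s : String} {rd : String × String} (h : pvSD.lookup s = some rd) :
    pvFour rd.1 := by
  simp only [pvSD, List.lookup] at h
  unfold pvFour
  repeat' split at h
  all_goals first
    | (cases h; simp)
    | simp_all

theorem pvR_risk {scopes : List String} {r : String} (h : r ∈ pvR scopes) : pvFour r := by
  simp only [pvR, List.mem_filterMap, Option.map_eq_some_iff] at h
  obtain ⟨s, -, rd, hrd, rfl⟩ := h
  exact pvSD_risk hrd

-- A's fused fold splits into the built findings and a min-fold over their risks
theorem pvFoldA_split (scopes : List String) (acc : List (List (String × String))) (best : String) :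
    scopes.foldl pvStepA (acc, best) = (acc ++ pvF scopes, pvMF best (pvR scopes)) := by
  induction scopes generalizing acc best with
  | nil => simp [pvF, pvR, pvMF]
  | cons s rest ih =>
    cases hs : pvSD.lookup s with
    | none => simp [pvF, pvR, pvStepA, hs, ih]
    | some rd =>
      obtain ⟨r, d⟩ := rd
      simp only [List.foldl_cons, pvStepA, hs]
      rw [ih]
      simp [pvF, pvR, pvMF, hs, pvFinding]

theorem pvPick_four (rs : List String) : pvFour (pvPick rs) := by
  unfold pvPick pvFour; split_ifs <;> simp

theorem pvMin2_four {b r : String} (hb : pvFour b) (hr : pvFour r) : pvFour (pvMin2 b r) := by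
  rcases hb with hb | hb | hb | hb <;> rcases hr with hr | hr | hr | hr <;>
    subst hb <;> subst hr <;> simp [pvMin2, pvFour, pvOrd, List.lookup]

-- the ladder choice is compositional over cons
theorem pvPick_cons {r : String} (hr : pvFour r) (rest : List String) :
    pvPick (r :: rest) = pvMin2 r (pvPick rest) := by
  rcases hr with h | h | h | h <;> subst h <;>
    unfold pvPick pvMin2 <;>
    by_cases h1 : "CRITICAL" ∈ rest <;>
    by_cases h2 : "HIGH" ∈ rest <;>
    by_cases h3 : "MEDIUM" ∈ rest <;>
    simp [h1, h2, h3, pvOrd, List.lookup]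

-- min-step associativity-style rearrangement on the four levels
theorem pvMin2_rot {b r x : String} (hb : pvFour b) (hr : pvFour r) (hx : pvFour x) :
    pvMin2 (pvMin2 b r) x = pvMin2 b (pvMin2 r x) := by
  rcases hb with hb | hb | hb | hb <;> rcases hr with hr | hr | hr | hr <;>
    rcases hx with hx | hx | hx | hx <;> subst hb <;> subst hr <;> subst hx <;> decide

-- A's running minimum equals the ladder choice, modulo the seed
theorem pvMF_pick (rs : List String) (hrs : ∀ r ∈ rs, pvFour r) (b : String) (hb : pvFour b) :
    pvMF b rs = pvMin2 b (pvPick rs) := by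
  induction rs generalizing b with
  | nil =>
    rcases hb with h | h | h | h <;> subst h <;> decide
  | cons r rest ih =>
    have hr : pvFour r := hrs r (by simp)
    have hrest : ∀ x ∈ rest, pvFour x := fun x hx => hrs x (by simp [hx])
    show pvMF (pvMin2 b r) rest = _
    rw [ih hrest _ (pvMin2_four hb hr), pvPick_cons hr,
        pvMin2_rot hb hr (pvPick_four rest)]

theorem pvMF_low (rs : List String) (hrs : ∀ r ∈ rs, pvFour r) :
    pvMF "LOW" rs = pvPick rs := by
  rw [pvMF_pick rs hrs "LOW" (by unfold pvFour; simp)]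
  have := pvPick_four rs
  rcases this with h | h | h | h <;> rw [h] <;> decide

-- B's set-membership ladder equals the ladder over the plain risk list
theorem pvLadder_present (scopes : List String) :
    pvLadder (pvPresent scopes) = pvPick (pvR scopes) := by
  have h : ∀ x : String, (pvPresent scopes).contains x = true ↔ x ∈ pvR scopes := by
    intro x; simp [pvPresent, pvR, PySem.Set.contains, PySem.Set.mem_ofList]
  unfold pvLadder pvPick
  rw [if_congr (h "CRITICAL") rfl (if_congr (h "HIGH") rfl (if_congr (h "MEDIUM") rfl rfl))]

theorem pv_lookup_some (td : List (String × List String)) :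
    "scopes" ∈ td.map Prod.fst → ∃ v, td.lookup "scopes" = some v := by
  induction td with
  | nil => simp
  | cons p rest ih =>
    rcases p with ⟨k, v⟩
    intro hk
    simp only [List.map_cons, List.mem_cons] at hk
    by_cases h : k = "scopes"
    · exact ⟨v, by simp [List.lookup, h]⟩
    · have hb : ("scopes" == k) = false := beq_eq_false_iff_ne.mpr (fun he => h he.symm)
      have hk' : "scopes" ∈ rest.map Prod.fst := by
        rcases hk with hk | hk
        · exact absurd hk.symm h
        · exact hk
      obtain ⟨w, hw⟩ := ih hk'
      exact ⟨w, by simp [List.lookup, hb, hw]⟩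

-- ===== VERDICT (by name: the statement is the Claim_ definition above) =====
theorem assess_real_scopes_spec : Claim_equal_assess_real_scopes := by
  intro td _ hpre
  obtain ⟨hne, hk⟩ := hpre
  obtain ⟨scopes, hsome⟩ := pv_lookup_some td hk
  unfold Spec_assess_real_scopes
  simp only [assess_real_scopes, assess_real_scopes_alt, if_neg hne, hsome]
  rw [pvFoldA_split scopes [] "LOW"]
  simp only [List.nil_append,
    show (scopes.filterMap (fun s => (pvSD.lookup s).map (fun rd => pvFinding s rd.1 rd.2))) = pvF scopes from rfl]
  rw [pvMF_low (pvR scopes) (fun r hr => pvR_risk hr), pvLadder_present]
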